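-- pv_equiv track=rewrite | github.com/jasonzc2025-tech/teaching-plan-evaluator | teaching_eval/scoring_controller.py | _has_complete_clause_scores
-- ===== SOURCE A (Python) =====
-- from typing import Any, Dict, List
--
-- def _is_general_clause(clause_code: str) -> bool:
--     """通用维度条款标识：以 G 开头（不区分大小写）。"""
--     code = str(clause_code or "").strip().upper()
--     return code.startswith("G")
--
-- def _is_specific_clause(clause_code: str) -> bool:
--     """分项维度条款标识：以 S 开头（不区分大小写）。"""
--     code = str(clause_code or "").strip().upper()
--     return code.startswith("S")
--
-- def _has_complete_clause_scores(clause_scores: List[Dict[str, Any]]) -> bool: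
--     """
--     Treat clause scores as authoritative only when the report contains a full
--     rubric shape. Some unit tests and guard callers pass a single clause to
--     exercise a cap; those partial inputs still need the summary fallback.
--     """
--     general_count = sum(
--         1 for item in clause_scores
--         if isinstance(item, dict) and _is_general_clause(item.get("clause_code", ""))
--     )
--     specific_count = sum(
--         1 for item in clause_scores
--         if isinstance(item, dict) and _is_specific_clause(item.get("clause_code", ""))
--     )
--     return general_count >= 6 and specific_count >= 4
-- ===== SOURCE B (Python) =====
-- from typing import Any, Dict, List
--
-- def _has_complete_clause_scores(clause_scores: List[Dict[str, Any]]) -> bool: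
--     general_count = 0
--     specific_count = 0
--     for item in clause_scores:
--         if general_count >= 6 and specific_count >= 4:
--             return True
--         if not isinstance(item, dict):
--             continue
--         code = str(item.get("clause_code", "") or "").strip().upper()
--         if code.startswith("G"):
--             general_count += 1
--         if code.startswith("S"):
--             specific_count += 1
--     return general_count >= 6 and specific_count >= 4
-- ===== Notes on version B (the rewrite author's own statement) =====
-- stated objective: simpler
-- what changed: Replaces A's two full sum-comprehension scans with a single pass that maintains both counters together and returns True early once both thresholds are met.
import Mathlib
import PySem

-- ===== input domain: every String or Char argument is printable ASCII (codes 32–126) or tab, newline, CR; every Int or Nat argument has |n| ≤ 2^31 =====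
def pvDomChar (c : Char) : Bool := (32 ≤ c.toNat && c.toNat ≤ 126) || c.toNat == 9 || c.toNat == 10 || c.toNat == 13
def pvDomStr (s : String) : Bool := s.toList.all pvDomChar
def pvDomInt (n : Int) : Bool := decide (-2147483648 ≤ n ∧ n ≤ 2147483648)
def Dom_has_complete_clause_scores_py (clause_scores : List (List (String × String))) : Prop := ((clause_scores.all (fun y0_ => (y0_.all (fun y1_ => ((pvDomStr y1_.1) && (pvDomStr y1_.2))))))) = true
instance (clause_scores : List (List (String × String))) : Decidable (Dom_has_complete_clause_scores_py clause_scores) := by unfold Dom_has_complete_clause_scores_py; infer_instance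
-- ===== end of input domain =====

-- B replaces A's two full sum-comprehension scans by one pass that maintains both counters
-- together and returns True early once both thresholds are met (objective: simpler, one pass).

-- ===== PORT A =====
-- item.get("clause_code", "") on an association-list dict: first match, default ""
def pvGetClauseCode : List (String × String) → String
  | [] => ""
  | (k, v) :: rest => if k == "clause_code" then v else pvGetClauseCode rest

-- _is_general_clause: code = str(clause_code or "").strip().upper(); code.startswith("G")
def pvIsGeneralClause (c : String) : Bool :=
  let code := PySem.Str.upper (PySem.Str.strip (if c == "" then "" else c))
  PySem.Str.startswith code "G"

-- _is_specific_clause: same with "S"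
def pvIsSpecificClause (c : String) : Bool :=
  let code := PySem.Str.upper (PySem.Str.strip (if c == "" then "" else c))
  PySem.Str.startswith code "S"

def has_complete_clause_scores_py (clause_scores : List (List (String × String))) : Bool :=
  let general_count : Nat :=
    clause_scores.foldl (fun acc item => if pvIsGeneralClause (pvGetClauseCode item) then acc + 1 else acc) 0
  let specific_count : Nat :=
    clause_scores.foldl (fun acc item => if pvIsSpecificClause (pvGetClauseCode item) then acc + 1 else acc) 0
  decide (general_count ≥ 6) && decide (specific_count ≥ 4)

-- ===== PORT B =====
def pvAltGo : List (List (String × String)) → Nat → Nat → Bool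
  | [], g, s => decide (g ≥ 6) && decide (s ≥ 4)
  | item :: rest, g, s =>
    if decide (g ≥ 6) && decide (s ≥ 4) then true
    else
      let code := pvGetClauseCode item
      let g' := if pvIsGeneralClause code then g + 1 else g
      let s' := if pvIsSpecificClause code then s + 1 else s
      pvAltGo rest g' s'

def has_complete_clause_scores_py_alt (clause_scores : List (List (String × String))) : Bool :=
  pvAltGo clause_scores 0 0

-- ===== PRECONDITION & SPEC =====
def Spec_has_complete_clause_scores_py (clause_scores : List (List (String × String))) (out : Bool) : Prop := out = has_complete_clause_scores_py_alt clause_scores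
instance (clause_scores : List (List (String × String))) (out : Bool) : Decidable (Spec_has_complete_clause_scores_py clause_scores out) := by unfold Spec_has_complete_clause_scores_py; infer_instance

-- ===== CLAIM (what is proved, stated in full; the proofs are below) =====
def Claim_equal_has_complete_clause_scores_py : Prop := ∀ (clause_scores : List (List (String × String))), Dom_has_complete_clause_scores_py clause_scores → Spec_has_complete_clause_scores_py clause_scores (has_complete_clause_scores_py clause_scores)

-- ===== LEMMAS AND PROOFS =====
theorem pv_foldl_count (p : List (String × String) → Bool) :
    ∀ (l : List (List (String × String))) (n : Nat),
      l.foldl (fun acc item => if p item then acc + 1 else acc) n = n + l.countP p := by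
  intro l
  induction l with
  | nil => intro n; simp
  | cons x xs ih =>
    intro n
    simp only [List.foldl_cons, List.countP_cons, ih]
    by_cases h : p x = true <;> simp [h] <;> omega

theorem pvAltGo_eq :
    ∀ (l : List (List (String × String))) (g s : Nat),
      pvAltGo l g s =
        (decide (6 ≤ g + l.countP (fun item => pvIsGeneralClause (pvGetClauseCode item))) &&
         decide (4 ≤ s + l.countP (fun item => pvIsSpecificClause (pvGetClauseCode item)))) := by
  intro l
  induction l with
  | nil => intro g s; simp [pvAltGo]
  | cons item rest ih =>
    intro g s
    rw [show pvAltGo (item :: rest) g s =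
          (if decide (g ≥ 6) && decide (s ≥ 4) then true
           else pvAltGo rest
             (if pvIsGeneralClause (pvGetClauseCode item) then g + 1 else g)
             (if pvIsSpecificClause (pvGetClauseCode item) then s + 1 else s)) from rfl]
    rw [List.countP_cons, List.countP_cons]
    by_cases hgs : (decide (g ≥ 6) && decide (s ≥ 4)) = true
    · rw [if_pos hgs]
      simp only [Bool.and_eq_true, decide_eq_true_eq] at hgs
      have h1 : decide (6 ≤ g + (rest.countP (fun item => pvIsGeneralClause (pvGetClauseCode item)) + if pvIsGeneralClause (pvGetClauseCode item) = true then 1 else 0)) = true := by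
        rw [decide_eq_true_eq]; omega
      have h2 : decide (4 ≤ s + (rest.countP (fun item => pvIsSpecificClause (pvGetClauseCode item)) + if pvIsSpecificClause (pvGetClauseCode item) = true then 1 else 0)) = true := by
        rw [decide_eq_true_eq]; omega
      rw [h1, h2]; rfl
    · rw [if_neg hgs, ih]
      rw [Bool.eq_iff_iff]
      simp only [Bool.and_eq_true, decide_eq_true_eq]
      by_cases hg : pvIsGeneralClause (pvGetClauseCode item) = true <;>
        by_cases hs : pvIsSpecificClause (pvGetClauseCode item) = true <;>
          simp only [hg, hs, if_true, if_false, Bool.false_eq_true] <;> omega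

-- ===== VERDICT (by name: the statement is the Claim_ definition above) =====
theorem has_complete_clause_scores_py_spec : Claim_equal_has_complete_clause_scores_py := by
  intro l _
  unfold Spec_has_complete_clause_scores_py has_complete_clause_scores_py has_complete_clause_scores_py_alt
  rw [pvAltGo_eq, pv_foldl_count, pv_foldl_count]
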